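-- pv_equiv track=rewrite | github.com/jonusHK/algorithm_data_structure | test_3.py | solution
-- ===== SOURCE A (Python) =====
-- def solution(U, L, C):
--     rst_li = [['0' for _ in range(len(C))] for _ in range(2)]
--     check_li = [False for _ in range(len(C))]
--     for idx, val in enumerate(C):
--         if val == 2:
--             rst_li[0][idx], rst_li[1][idx] = '1', '1'
--             check_li[idx] = True
--             U -= 1
--             L -= 1
--         elif val == 0:
--             check_li[idx] = True
--
--     for idx, val in enumerate(check_li):
--         if val == False:
--             if U > 0:
--                 rst_li[0][idx] = '1'
--                 U -= 1
--             else: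
--                 rst_li[1][idx] = '1'
--                 L -= 1
--
--     if U > 0 or L > 0:
--         return "IMPOSSIBLE"
--
--     rst = ''
--     for i in range(len(rst_li)):
--         rst += ''.join(rst_li[i])
--         if (i != len(rst_li) - 1):
--             rst += ','
--
--     return rst
-- ===== SOURCE B (Python) =====
-- def solution(U, L, C):
--     # Encode the grid as a template string ('2' fixed-both, '0' empty, 'F' free),
--     # then produce both rows by counted string replacement instead of any per-column loop.
--     tmpl = ''.join('2' if v == 2 else '0' if v == 0 else 'F' for v in C)
--     twos = tmpl.count('2')
--     nfree = tmpl.count('F')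
--     up = max(0, min(U - twos, nfree))
--     if U - twos - up > 0 or L - twos - (nfree - up) > 0:
--         return "IMPOSSIBLE"
--     top = tmpl.replace('F', '1', up).replace('F', '0').replace('2', '1')
--     bot = tmpl.replace('F', '0', up).replace('F', '1').replace('2', '1')
--     return top + ',' + bot
-- ===== Notes on version B (the rewrite author's own statement) =====
-- stated objective: alternative
-- what changed: B never iterates over columns making per-column decisions: it encodes the grid as a template string of tokens '2'/'0'/'F', decides feasibility by closed-form arithmetic on character counts, and materialises both rows purely by counted and unconditional string replacements (replace('F','1',up) etc.), replacing A's boolean check-array and second greedy budget-decrementing scan.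
import Mathlib
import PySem

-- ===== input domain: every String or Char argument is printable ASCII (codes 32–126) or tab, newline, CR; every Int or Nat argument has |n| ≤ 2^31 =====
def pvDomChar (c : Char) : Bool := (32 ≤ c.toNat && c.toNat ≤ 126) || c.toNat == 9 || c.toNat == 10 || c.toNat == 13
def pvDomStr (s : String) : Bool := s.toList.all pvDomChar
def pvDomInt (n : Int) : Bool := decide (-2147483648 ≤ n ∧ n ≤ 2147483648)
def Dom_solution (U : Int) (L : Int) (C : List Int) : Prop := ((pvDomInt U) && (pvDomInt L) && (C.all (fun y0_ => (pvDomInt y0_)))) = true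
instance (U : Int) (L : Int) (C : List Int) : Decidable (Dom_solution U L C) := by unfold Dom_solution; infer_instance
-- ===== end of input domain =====

-- B replaces A's boolean check-array and second greedy budget-decrementing scan by a
-- token template with counted/unconditional string replacements and closed-form
-- feasibility arithmetic on character counts (alternative decomposition, same O(n) cost).


-- ===== PORT A =====
-- first loop body: mark '1','1' on val==2 (decrement both budgets), tick check on val==0
def stepA1 (st : List Char × List Char × List Bool × Int × Int) (iv : Int × Int) :
    List Char × List Char × List Bool × Int × Int :=
  if iv.2 = 2 then
    (PySem.List.pySetD st.1 iv.1 '1', PySem.List.pySetD st.2.1 iv.1 '1',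
     PySem.List.pySetD st.2.2.1 iv.1 true, st.2.2.2.1 - 1, st.2.2.2.2 - 1)
  else if iv.2 = 0 then
    (st.1, st.2.1, PySem.List.pySetD st.2.2.1 iv.1 true, st.2.2.2.1, st.2.2.2.2)
  else st

-- second loop body: unchecked column goes to the upper row while U > 0, else lower
def stepA2 (st : List Char × List Char × Int × Int) (iv : Int × Bool) :
    List Char × List Char × Int × Int :=
  if iv.2 = false then
    if 0 < st.2.2.1 then (PySem.List.pySetD st.1 iv.1 '1', st.2.1, st.2.2.1 - 1, st.2.2.2)
    else (st.1, PySem.List.pySetD st.2.1 iv.1 '1', st.2.2.1, st.2.2.2 - 1)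
  else st

def solution (U : Int) (L : Int) (C : List Int) : String :=
  let s1 := (PySem.List.enumerate C).foldl stepA1
      (List.replicate C.length '0', List.replicate C.length '0',
       List.replicate C.length false, U, L)
  let s2 := (PySem.List.enumerate s1.2.2.1).foldl stepA2
      (s1.1, s1.2.1, s1.2.2.2.1, s1.2.2.2.2)
  if 0 < s2.2.2.1 ∨ 0 < s2.2.2.2 then "IMPOSSIBLE"
  else
    String.ofList ((PySem.List.pyRange 0 2 1).foldl
      (fun rst i =>
        (rst ++ (if i = 0 then s2.1 else s2.2.1)) ++ (if i ≠ 2 - 1 then [','] else []))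
      [])

-- ===== PORT B =====
-- per-column token: '2' fixed-both, '0' empty, 'F' free
def tokB (v : Int) : Char := if v = 2 then '2' else if v = 0 then '0' else 'F'

-- str.replace(old, new, count) for single-char old/new over List Char (exact: Python
-- stops after `count` replacements; a negative count replaces all, as here n never hits 0)
def repN : List Char → Char → Char → Int → List Char
  | [], _, _, _ => []
  | c :: t, o, nw, n =>
    if n = 0 then c :: t
    else if c = o then nw :: repN t o nw (n - 1)
    else c :: repN t o nw n

-- str.replace(old, new) for single-char old/new over List Char (exact: replaces every occurrence)
def repAll (cs : List Char) (o nw : Char) : List Char :=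
  cs.map (fun c => if c = o then nw else c)

def solution_alt (U : Int) (L : Int) (C : List Int) : String :=
  let tmpl := C.map tokB
  let twos : Int := (tmpl.count '2' : Int)
  let nfree : Int := (tmpl.count 'F' : Int)
  let up := max 0 (min (U - twos) nfree)
  if 0 < U - twos - up ∨ 0 < L - twos - (nfree - up) then "IMPOSSIBLE"
  else
    let top := repAll (repAll (repN tmpl 'F' '1' up) 'F' '0') '2' '1'
    let bot := repAll (repAll (repN tmpl 'F' '0' up) 'F' '1') '2' '1'
    String.ofList (top ++ ',' :: bot)

-- ===== PRECONDITION & SPEC =====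
def Spec_solution (U : Int) (L : Int) (C : List Int) (out : String) : Prop := out = solution_alt U L C
instance (U : Int) (L : Int) (C : List Int) (out : String) : Decidable (Spec_solution U L C out) := by unfold Spec_solution; infer_instance

-- ===== CLAIM (what is proved, stated in full; the proofs are below) =====
def Claim_equal_solution : Prop := ∀ (U : Int) (L : Int) (C : List Int), Dom_solution U L C → Spec_solution U L C (solution U L C)

-- ===== LEMMAS AND PROOFS =====

-- common normal form of the assignment (proof-side only)
def nfA : Int → Int → List Int → List Char × List Char × Int × Int
  | u, l, [] => ([], [], u, l)
  | u, l, v :: cs =>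
    if v = 2 then
      let r := nfA u l cs; ('1' :: r.1, '1' :: r.2.1, r.2.2)
    else if v = 0 then
      let r := nfA u l cs; ('0' :: r.1, '0' :: r.2.1, r.2.2)
    else if 0 < u then
      let r := nfA (u - 1) l cs; ('1' :: r.1, '0' :: r.2.1, r.2.2)
    else
      let r := nfA u (l - 1) cs; ('0' :: r.1, '1' :: r.2.1, r.2.2)

def fcA (v : Int) : Char := if v = 2 then '1' else '0'
def gbA (v : Int) : Bool := v == 2 || v == 0

lemma loop1_char (cs : List Int) :
    ∀ (s : Nat) (p0 p1 : List Char) (pc : List Bool) (u l : Int),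
    p0.length = s → p1.length = s → pc.length = s →
    (PySem.List.enumerate cs (s : Int)).foldl stepA1
        (p0 ++ List.replicate cs.length '0', p1 ++ List.replicate cs.length '0',
         pc ++ List.replicate cs.length false, u, l)
      = (p0 ++ cs.map fcA, p1 ++ cs.map fcA, pc ++ cs.map gbA,
         u - (cs.countP (fun v => v == 2) : Int), l - (cs.countP (fun v => v == 2) : Int)) := by
  induction cs with
  | nil =>
    intro s p0 p1 pc u l h0 h1 h2
    simp [PySem.List.enumerate_nil]
  | cons v rest ih =>
    intro s p0 p1 pc u l h0 h1 h2
    rw [show (v :: rest).length = rest.length + 1 from rfl, List.replicate_succ,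
        PySem.List.enumerate_cons, List.foldl_cons]
    have hset0 : ∀ (xs : List Char) (t : List Char) (c : Char), xs.length = s →
        PySem.List.pySetD (xs ++ '0' :: t) (s : Int) c = (xs ++ [c]) ++ t := by
      intro xs t c hx
      rw [PySem.List.pySetD_natCast, List.set_append]
      simp [hx]
    have hsetb : ∀ (xs : List Bool) (t : List Bool) (b : Bool), xs.length = s →
        PySem.List.pySetD (xs ++ false :: t) (s : Int) b = (xs ++ [b]) ++ t := by
      intro xs t b hx
      rw [PySem.List.pySetD_natCast, List.set_append]
      simp [hx]
    have hcast : (s : Int) + 1 = ((s + 1 : Nat) : Int) := by push_cast; ring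
    by_cases h2v : v = 2
    · subst h2v
      show (PySem.List.enumerate rest ((s:Int)+1)).foldl stepA1
          (stepA1 (p0 ++ '0' :: List.replicate rest.length '0',
                   p1 ++ '0' :: List.replicate rest.length '0',
                   pc ++ false :: List.replicate rest.length false, u, l) ((s:Int), 2)) = _
      rw [show stepA1 (p0 ++ '0' :: List.replicate rest.length '0',
                   p1 ++ '0' :: List.replicate rest.length '0',
                   pc ++ false :: List.replicate rest.length false, u, l) ((s:Int), 2)
            = ((p0 ++ ['1']) ++ List.replicate rest.length '0',
               (p1 ++ ['1']) ++ List.replicate rest.length '0',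
               (pc ++ [true]) ++ List.replicate rest.length false, u - 1, l - 1) from by
        simp [stepA1, hset0 p0 _ _ h0, hset0 p1 _ _ h1, hsetb pc _ _ h2]]
      rw [hcast, ih (s+1) _ _ _ _ _ (by simp [h0]) (by simp [h1]) (by simp [h2])]
      simp [fcA, gbA]
      constructor
      · omega
      · omega
    · by_cases h0v : v = 0
      · subst h0v
        show (PySem.List.enumerate rest ((s:Int)+1)).foldl stepA1
            (stepA1 (p0 ++ '0' :: List.replicate rest.length '0',
                     p1 ++ '0' :: List.replicate rest.length '0',
                     pc ++ false :: List.replicate rest.length false, u, l) ((s:Int), 0)) = _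
        rw [show stepA1 (p0 ++ '0' :: List.replicate rest.length '0',
                     p1 ++ '0' :: List.replicate rest.length '0',
                     pc ++ false :: List.replicate rest.length false, u, l) ((s:Int), 0)
              = ((p0 ++ ['0']) ++ List.replicate rest.length '0',
                 (p1 ++ ['0']) ++ List.replicate rest.length '0',
                 (pc ++ [true]) ++ List.replicate rest.length false, u, l) from by
          simp [stepA1, hsetb pc _ _ h2]]
        rw [hcast, ih (s+1) _ _ _ _ _ (by simp [h0]) (by simp [h1]) (by simp [h2])]
        simp [fcA, gbA]
      · show (PySem.List.enumerate rest ((s:Int)+1)).foldl stepA1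
            (stepA1 (p0 ++ '0' :: List.replicate rest.length '0',
                     p1 ++ '0' :: List.replicate rest.length '0',
                     pc ++ false :: List.replicate rest.length false, u, l) ((s:Int), v)) = _
        rw [show stepA1 (p0 ++ '0' :: List.replicate rest.length '0',
                     p1 ++ '0' :: List.replicate rest.length '0',
                     pc ++ false :: List.replicate rest.length false, u, l) ((s:Int), v)
              = ((p0 ++ ['0']) ++ List.replicate rest.length '0',
                 (p1 ++ ['0']) ++ List.replicate rest.length '0',
                 (pc ++ [false]) ++ List.replicate rest.length false, u, l) from by
          simp [stepA1, h2v, h0v]]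
        rw [hcast, ih (s+1) _ _ _ _ _ (by simp [h0]) (by simp [h1]) (by simp [h2])]
        simp [fcA, gbA, h2v, h0v]

lemma loop2_char (cs : List Int) :
    ∀ (s : Nat) (p0 p1 : List Char) (u l : Int),
    p0.length = s → p1.length = s →
    (PySem.List.enumerate (cs.map gbA) (s : Int)).foldl stepA2
        (p0 ++ cs.map fcA, p1 ++ cs.map fcA, u, l)
      = (p0 ++ (nfA u l cs).1, p1 ++ (nfA u l cs).2.1,
         (nfA u l cs).2.2.1, (nfA u l cs).2.2.2) := by
  induction cs with
  | nil =>
    intro s p0 p1 u l h0 h1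
    simp [PySem.List.enumerate_nil, nfA]
  | cons v rest ih =>
    intro s p0 p1 u l h0 h1
    rw [List.map_cons, List.map_cons, PySem.List.enumerate_cons, List.foldl_cons]
    have hcast : (s : Int) + 1 = ((s + 1 : Nat) : Int) := by push_cast; ring
    have hset : ∀ (xs : List Char) (t : List Char) (h c : Char), xs.length = s →
        PySem.List.pySetD (xs ++ h :: t) (s : Int) c = (xs ++ [c]) ++ t := by
      intro xs t h c hx
      rw [PySem.List.pySetD_natCast, List.set_append]
      simp [hx]
    by_cases h2v : v = 2
    · subst h2v
      rw [show stepA2 (p0 ++ fcA 2 :: rest.map fcA, p1 ++ fcA 2 :: rest.map fcA, u, l)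
            ((s : Int), gbA 2) = (p0 ++ fcA 2 :: rest.map fcA, p1 ++ fcA 2 :: rest.map fcA, u, l) from by
        simp [stepA2, gbA]]
      rw [List.append_cons p0, List.append_cons p1, hcast,
          ih (s+1) _ _ u l (by simp [h0, fcA]) (by simp [h1, fcA])]
      simp [nfA, fcA]
    · by_cases h0v : v = 0
      · subst h0v
        rw [show stepA2 (p0 ++ fcA 0 :: rest.map fcA, p1 ++ fcA 0 :: rest.map fcA, u, l)
              ((s : Int), gbA 0) = (p0 ++ fcA 0 :: rest.map fcA, p1 ++ fcA 0 :: rest.map fcA, u, l) from by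
          simp [stepA2, gbA]]
        rw [List.append_cons p0, List.append_cons p1, hcast,
            ih (s+1) _ _ u l (by simp [h0, fcA]) (by simp [h1, fcA])]
        simp [nfA, fcA]
      · have hgb : gbA v = false := by simp [gbA, h2v, h0v]
        have hfc : fcA v = '0' := by simp [fcA, h2v]
        rw [hgb, hfc]
        by_cases hu : 0 < u
        · rw [show stepA2 (p0 ++ '0' :: rest.map fcA, p1 ++ '0' :: rest.map fcA, u, l)
                ((s : Int), false)
              = ((p0 ++ ['1']) ++ rest.map fcA, p1 ++ '0' :: rest.map fcA, u - 1, l) from by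
            simp [stepA2, hu, hset p0 _ _ _ h0]]
          rw [List.append_cons p1, hcast,
              ih (s+1) _ _ (u-1) l (by simp [h0]) (by simp [h1])]
          simp [nfA, h2v, h0v, hu]
        · rw [show stepA2 (p0 ++ '0' :: rest.map fcA, p1 ++ '0' :: rest.map fcA, u, l)
                ((s : Int), false)
              = (p0 ++ '0' :: rest.map fcA, (p1 ++ ['1']) ++ rest.map fcA, u, l - 1) from by
            simp [stepA2, hu, hset p1 _ _ _ h1]]
          rw [List.append_cons p0, hcast,
              ih (s+1) _ _ u (l-1) (by simp [h0]) (by simp [h1])]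
          simp [nfA, h2v, h0v, hu]

-- number of free columns
def cF (cs : List Int) : Nat := cs.countP (fun v => !(v == 0) && !(v == 2))

lemma repN_zero (cs : List Char) (o nw : Char) : repN cs o nw 0 = cs := by
  cases cs <;> simp [repN]

lemma repAll_cons (c : Char) (t : List Char) (o nw : Char) :
    repAll (c :: t) o nw = (if c = o then nw else c) :: repAll t o nw := rfl

-- characterisation of B's row construction against the normal form
lemma alt_char (cs : List Int) :
    ∀ (u l m : Int), m = max 0 (min u ((cF cs : Int))) →
    (repAll (repAll (repN (cs.map tokB) 'F' '1' m) 'F' '0') '2' '1' = (nfA u l cs).1)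
    ∧ (repAll (repAll (repN (cs.map tokB) 'F' '0' m) 'F' '1') '2' '1' = (nfA u l cs).2.1)
    ∧ (nfA u l cs).2.2.1 = u - m
    ∧ (nfA u l cs).2.2.2 = l - ((cF cs : Int) - m) := by
  induction cs with
  | nil =>
    intro u l m hm
    simp only [cF, List.countP_nil, Int.natCast_zero] at hm
    refine ⟨by simp [repN, repAll, nfA], by simp [repN, repAll, nfA], ?_, ?_⟩
    · simp only [nfA]; omega
    · simp only [nfA, cF, List.countP_nil]; omega
  | cons v rest ih =>
    intro u l m hm
    by_cases h2v : v = 2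
    · have htok : tokB v = '2' := by simp [tokB, h2v]
      have hcf : cF (v :: rest) = cF rest := by simp [cF, h2v]
      rw [hcf] at hm
      obtain ⟨ih1, ih2, ih3, ih4⟩ := ih u l m hm
      have hrep : ∀ nw, repN (tokB v :: rest.map tokB) 'F' nw m
          = '2' :: repN (rest.map tokB) 'F' nw m := by
        intro nw
        by_cases hm0 : m = 0
        · subst hm0; rw [repN_zero, repN_zero, htok]
        · simp [repN, htok, hm0]
      subst h2v
      refine ⟨?_, ?_, ?_, ?_⟩
      · rw [List.map_cons, hrep, repAll_cons, repAll_cons]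
        simp [nfA, ih1]
      · rw [List.map_cons, hrep, repAll_cons, repAll_cons]
        simp [nfA, ih2]
      · simp [nfA, ih3]
      · simp [nfA, ih4, hcf]
    · by_cases h0v : v = 0
      · have htok : tokB v = '0' := by simp [tokB, h0v]
        have hcf : cF (v :: rest) = cF rest := by simp [cF, h0v]
        rw [hcf] at hm
        obtain ⟨ih1, ih2, ih3, ih4⟩ := ih u l m hm
        have hrep : ∀ nw, repN (tokB v :: rest.map tokB) 'F' nw m
            = '0' :: repN (rest.map tokB) 'F' nw m := by
          intro nw
          by_cases hm0 : m = 0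
          · subst hm0; rw [repN_zero, repN_zero, htok]
          · simp [repN, htok, hm0]
        subst h0v
        refine ⟨?_, ?_, ?_, ?_⟩
        · rw [List.map_cons, hrep, repAll_cons, repAll_cons]
          simp [nfA, ih1]
        · rw [List.map_cons, hrep, repAll_cons, repAll_cons]
          simp [nfA, ih2]
        · simp [nfA, ih3]
        · simp [nfA, ih4, hcf]
      · have htok : tokB v = 'F' := by simp [tokB, h2v, h0v]
        have hcf : cF (v :: rest) = cF rest + 1 := by
          simp [cF, h0v, h2v]
        rw [hcf] at hm
        by_cases hu : 0 < u
        · have hm1 : 1 ≤ m := by omega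
          obtain ⟨ih1, ih2, ih3, ih4⟩ := ih (u - 1) l (m - 1) (by omega)
          have hrep : ∀ nw, repN (tokB v :: rest.map tokB) 'F' nw m
              = nw :: repN (rest.map tokB) 'F' nw (m - 1) := by
            intro nw
            simp [repN, htok, show m ≠ 0 by omega]
          refine ⟨?_, ?_, ?_, ?_⟩
          · rw [List.map_cons, hrep, repAll_cons, repAll_cons]
            simp [nfA, h2v, h0v, hu, ih1]
          · rw [List.map_cons, hrep, repAll_cons, repAll_cons]
            simp [nfA, h2v, h0v, hu, ih2]
          · simp only [nfA, if_neg h2v, if_neg h0v, if_pos hu, ih3]; omega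
          · simp only [nfA, if_neg h2v, if_neg h0v, if_pos hu, ih4, hcf]
            push_cast; omega
        · have hm0 : m = 0 := by omega
          subst hm0
          obtain ⟨ih1, ih2, ih3, ih4⟩ := ih u (l - 1) 0 (by omega)
          rw [repN_zero] at ih1 ih2
          refine ⟨?_, ?_, ?_, ?_⟩
          · rw [List.map_cons, repN_zero, htok, repAll_cons, repAll_cons]
            simp [nfA, h2v, h0v, hu, ih1]
          · rw [List.map_cons, repN_zero, htok, repAll_cons, repAll_cons]
            simp [nfA, h2v, h0v, hu, ih2]
          · simp only [nfA, if_neg h2v, if_neg h0v, if_neg hu, ih3]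
          · simp only [nfA, if_neg h2v, if_neg h0v, if_neg hu, ih4, hcf]
            push_cast; omega

lemma count_tok_two (C : List Int) :
    (C.map tokB).count '2' = C.countP (fun v => v == 2) := by
  simp only [List.count_eq_countP, List.countP_map]
  apply List.countP_congr
  intro v _
  by_cases h2 : v = 2 <;> by_cases h0 : v = 0 <;> simp [Function.comp, tokB, h2, h0]

lemma count_tok_free (C : List Int) : (C.map tokB).count 'F' = cF C := by
  simp only [cF, List.count_eq_countP, List.countP_map]
  apply List.countP_congr
  intro v _
  by_cases h2 : v = 2 <;> by_cases h0 : v = 0 <;> simp [Function.comp, tokB, h2, h0]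

lemma solution_nf (U L : Int) (C : List Int) :
    solution U L C =
      (if 0 < (nfA (U - (C.countP (fun v => v == 2) : Int)) (L - (C.countP (fun v => v == 2) : Int)) C).2.2.1
          ∨ 0 < (nfA (U - (C.countP (fun v => v == 2) : Int)) (L - (C.countP (fun v => v == 2) : Int)) C).2.2.2
       then "IMPOSSIBLE"
       else String.ofList
         ((nfA (U - (C.countP (fun v => v == 2) : Int)) (L - (C.countP (fun v => v == 2) : Int)) C).1
           ++ ',' :: (nfA (U - (C.countP (fun v => v == 2) : Int)) (L - (C.countP (fun v => v == 2) : Int)) C).2.1)) := by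
  have hrange : PySem.List.pyRange 0 2 1 = [(0:Int), 1] := by decide
  have h1 := loop1_char C 0 [] [] [] U L rfl rfl rfl
  simp only [List.nil_append, Nat.cast_zero] at h1
  have h2 := loop2_char C 0 [] [] (U - (C.countP (fun v => v == 2) : Int))
      (L - (C.countP (fun v => v == 2) : Int)) rfl rfl
  simp only [List.nil_append, Nat.cast_zero] at h2
  unfold solution
  simp only [h1, h2, hrange, List.foldl_cons, List.foldl_nil]
  simp

lemma solution_alt_nf (U L : Int) (C : List Int) :
    solution_alt U L C =
      (if 0 < (nfA (U - (C.countP (fun v => v == 2) : Int)) (L - (C.countP (fun v => v == 2) : Int)) C).2.2.1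
          ∨ 0 < (nfA (U - (C.countP (fun v => v == 2) : Int)) (L - (C.countP (fun v => v == 2) : Int)) C).2.2.2
       then "IMPOSSIBLE"
       else String.ofList
         ((nfA (U - (C.countP (fun v => v == 2) : Int)) (L - (C.countP (fun v => v == 2) : Int)) C).1
           ++ ',' :: (nfA (U - (C.countP (fun v => v == 2) : Int)) (L - (C.countP (fun v => v == 2) : Int)) C).2.1)) := by
  obtain ⟨b1, b2, b3, b4⟩ := alt_char C (U - (C.countP (fun v => v == 2) : Int))
      (L - (C.countP (fun v => v == 2) : Int))
      (max 0 (min (U - (C.countP (fun v => v == 2) : Int)) ((cF C : Int)))) rfl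
  unfold solution_alt
  simp only [count_tok_two, count_tok_free]
  rw [b1, b2]
  have hc : (0 < U - (C.countP (fun v => v == 2) : Int) - max 0 (min (U - (C.countP (fun v => v == 2) : Int)) ((cF C : Int)))
      ∨ 0 < L - (C.countP (fun v => v == 2) : Int) - ((cF C : Int) - max 0 (min (U - (C.countP (fun v => v == 2) : Int)) ((cF C : Int)))))
      ↔ (0 < (nfA (U - (C.countP (fun v => v == 2) : Int)) (L - (C.countP (fun v => v == 2) : Int)) C).2.2.1
        ∨ 0 < (nfA (U - (C.countP (fun v => v == 2) : Int)) (L - (C.countP (fun v => v == 2) : Int)) C).2.2.2) := by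
    rw [b3, b4]
  exact if_congr hc rfl rfl

-- ===== VERDICT (by name: the statement is the Claim_ definition above) =====
theorem solution_spec : Claim_equal_solution := by
  intro U L C _
  unfold Spec_solution
  rw [solution_nf, solution_alt_nf]
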